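-- pv_equiv track=rewrite | github.com/sayantanmandal1/LearnPath | backend/app/services/learning_path_service.py | _group_skills_for_certifications
-- ===== SOURCE A (Python) =====
-- from typing import List, Dict, Optional, Tuple, Any
--
-- def _group_skills_for_certifications(skills: List[str]) -> Dict[str, List[str]]:
--     """Group skills into certification tracks."""
--     tracks = {}
--
--     # Define certification tracks
--     cert_mappings = {
--         "AWS Cloud": ["aws", "cloud_computing", "devops"],
--         "Data Science": ["python", "machine_learning", "data_science", "statistics"],
--         "Web Development": ["javascript", "react", "html", "css", "node.js"],
--         "DevOps": ["docker", "kubernetes", "ci_cd", "linux"]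
--     }
--
--     for track, track_skills in cert_mappings.items():
--         matching_skills = [s for s in skills if s.lower() in [ts.lower() for ts in track_skills]]
--         if matching_skills:
--             tracks[track] = matching_skills
--
--     return tracks
-- ===== SOURCE B (Python) =====
-- from typing import List, Dict
--
-- _CERT_MAPPINGS = {
--     "AWS Cloud": ["aws", "cloud_computing", "devops"],
--     "Data Science": ["python", "machine_learning", "data_science", "statistics"],
--     "Web Development": ["javascript", "react", "html", "css", "node.js"],
--     "DevOps": ["docker", "kubernetes", "ci_cd", "linux"],
-- }
--
-- # Inverted index: lowercased track skill -> track name (tracks are disjoint).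
-- _SKILL_TO_TRACK = {ts.lower(): track for track, lst in _CERT_MAPPINGS.items() for ts in lst}
--
--
-- def _group_skills_for_certifications(skills: List[str]) -> Dict[str, List[str]]:
--     """Group skills into certification tracks (single pass over skills via an inverted index)."""
--     groups = {}
--     for s in skills:
--         track = _SKILL_TO_TRACK.get(s.lower())
--         if track is not None:
--             groups.setdefault(track, []).append(s)
--     # Emit tracks in the canonical mapping order.
--     return {track: groups[track] for track in _CERT_MAPPINGS if track in groups}
-- ===== Notes on version B (the rewrite author's own statement) =====
-- stated objective: faster
-- what changed: Replaces A's per-track rescans of the whole skills list (which also rebuilds the lowered track-skill list inside the comprehension for every skill) by a precomputed inverted index (lowered skill -> track) and a single pass over skills appending each matching skill to its track's group, emitting tracks in the canonical mapping order.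
import Mathlib
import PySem

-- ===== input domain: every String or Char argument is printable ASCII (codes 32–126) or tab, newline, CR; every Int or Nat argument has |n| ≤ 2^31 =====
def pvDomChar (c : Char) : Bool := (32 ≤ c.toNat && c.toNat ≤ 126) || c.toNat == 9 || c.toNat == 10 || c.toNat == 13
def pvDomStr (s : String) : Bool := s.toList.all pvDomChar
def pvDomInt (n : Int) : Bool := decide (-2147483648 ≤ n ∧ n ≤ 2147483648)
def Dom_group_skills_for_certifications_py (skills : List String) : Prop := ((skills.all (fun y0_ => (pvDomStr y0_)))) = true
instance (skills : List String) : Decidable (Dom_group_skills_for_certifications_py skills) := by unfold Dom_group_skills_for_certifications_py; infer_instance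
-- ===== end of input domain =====

-- B replaces A's per-track rescans of skills with a precomputed inverted index and one pass over skills (measured faster; identical return value).

-- ===== PORT A =====
-- the cert_mappings dict of A, as an insertion-ordered association list
def pvCertMappings : List (String × List String) :=
  [("AWS Cloud", ["aws", "cloud_computing", "devops"]),
   ("Data Science", ["python", "machine_learning", "data_science", "statistics"]),
   ("Web Development", ["javascript", "react", "html", "css", "node.js"]),
   ("DevOps", ["docker", "kubernetes", "ci_cd", "linux"])]

def group_skills_for_certifications_py (skills : List String) : List (String × List String) :=
  (pvCertMappings.foldl
    (fun (tracks : PySem.Dict String (List String)) tp =>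
      let matching := skills.filter
        (fun s => (tp.2.map (fun ts => PySem.Str.lower ts)).contains (PySem.Str.lower s))
      if matching.isEmpty then tracks else tracks.insert tp.1 matching)
    PySem.Dict.empty).items

-- ===== PORT B =====
-- inverted index built once from pvCertMappings: lowered track-skill → track name
def pvSkillToTrack : PySem.Dict String String :=
  pvCertMappings.foldl
    (fun d tp => tp.2.foldl (fun d ts => d.insert (PySem.Str.lower ts) tp.1) d)
    PySem.Dict.empty

def group_skills_for_certifications_py_alt (skills : List String) : List (String × List String) :=
  let groups : PySem.Dict String (List String) :=
    skills.foldl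
      (fun d s =>
        match pvSkillToTrack.get? (PySem.Str.lower s) with
        | some track => d.modify track [] (fun l => l ++ [s])
        | none => d)
      PySem.Dict.empty
  ((pvCertMappings.map Prod.fst).foldl
    (fun (out : PySem.Dict String (List String)) track =>
      if groups.contains track then out.insert track (groups.getD track []) else out)
    PySem.Dict.empty).items

-- ===== PRECONDITION & SPEC =====
def Spec_group_skills_for_certifications_py (skills : List String) (out : List (String × List String)) : Prop := out = group_skills_for_certifications_py_alt skills
instance (skills : List String) (out : List (String × List String)) : Decidable (Spec_group_skills_for_certifications_py skills out) := by unfold Spec_group_skills_for_certifications_py; infer_instance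

-- ===== CLAIM (what is proved, stated in full; the proofs are below) =====
def Claim_equal_group_skills_for_certifications_py : Prop := ∀ (skills : List String), Dom_group_skills_for_certifications_py skills → Spec_group_skills_for_certifications_py skills (group_skills_for_certifications_py skills)

-- ===== LEMMAS AND PROOFS =====
-- the inverted index as a literal association list (what pvSkillToTrack evaluates to)
def pvIdxList : List (String × String) := [("aws","AWS Cloud"), ("cloud_computing","AWS Cloud"), ("devops","AWS Cloud"), ("python","Data Science"), ("machine_learning","Data Science"), ("data_science","Data Science"), ("statistics","Data Science"), ("javascript","Web Development"), ("react","Web Development"), ("html","Web Development"), ("css","Web Development"), ("node.js","Web Development"), ("docker","DevOps"), ("kubernetes","DevOps"), ("ci_cd","DevOps"), ("linux","DevOps")]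

theorem pvIdx_eq : pvSkillToTrack = PySem.Dict.mk pvIdxList := by rfl

set_option maxRecDepth 10000 in
theorem pvCls1 (x : String) : (pvSkillToTrack.get? x == some "AWS Cloud") = ((["aws", "cloud_computing", "devops"].map (fun ts => PySem.Str.lower ts)).contains x : Bool) := by
  have hmap : (["aws", "cloud_computing", "devops"].map (fun ts => PySem.Str.lower ts)) = (["aws", "cloud_computing", "devops"] : List String) := by rfl
  rw [hmap]
  by_cases h1 : ("aws" : String) = x
  · rw [← h1]; rfl
  by_cases h2 : ("cloud_computing" : String) = x
  · rw [← h2]; rfl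
  by_cases h3 : ("devops" : String) = x
  · rw [← h3]; rfl
  by_cases h4 : ("python" : String) = x
  · rw [← h4]; rfl
  by_cases h5 : ("machine_learning" : String) = x
  · rw [← h5]; rfl
  by_cases h6 : ("data_science" : String) = x
  · rw [← h6]; rfl
  by_cases h7 : ("statistics" : String) = x
  · rw [← h7]; rfl
  by_cases h8 : ("javascript" : String) = x
  · rw [← h8]; rfl
  by_cases h9 : ("react" : String) = x
  · rw [← h9]; rfl
  by_cases h10 : ("html" : String) = x
  · rw [← h10]; rfl
  by_cases h11 : ("css" : String) = x
  · rw [← h11]; rfl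
  by_cases h12 : ("node.js" : String) = x
  · rw [← h12]; rfl
  by_cases h13 : ("docker" : String) = x
  · rw [← h13]; rfl
  by_cases h14 : ("kubernetes" : String) = x
  · rw [← h14]; rfl
  by_cases h15 : ("ci_cd" : String) = x
  · rw [← h15]; rfl
  by_cases h16 : ("linux" : String) = x
  · rw [← h16]; rfl
  rw [pvIdx_eq]
  simp only [pvIdxList, PySem.Dict.get?_mk_cons, List.contains, beq_iff_eq, h1, h2, h3, h4, h5, h6, h7, h8, h9, h10, h11, h12, h13, h14, h15, h16]
  simp [PySem.Dict.get?, Ne.symm h1, Ne.symm h2, Ne.symm h3]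
set_option maxRecDepth 10000 in
theorem pvCls2 (x : String) : (pvSkillToTrack.get? x == some "Data Science") = ((["python", "machine_learning", "data_science", "statistics"].map (fun ts => PySem.Str.lower ts)).contains x : Bool) := by
  have hmap : (["python", "machine_learning", "data_science", "statistics"].map (fun ts => PySem.Str.lower ts)) = (["python", "machine_learning", "data_science", "statistics"] : List String) := by rfl
  rw [hmap]
  by_cases h1 : ("aws" : String) = x
  · rw [← h1]; rfl
  by_cases h2 : ("cloud_computing" : String) = x
  · rw [← h2]; rfl
  by_cases h3 : ("devops" : String) = x
  · rw [← h3]; rfl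
  by_cases h4 : ("python" : String) = x
  · rw [← h4]; rfl
  by_cases h5 : ("machine_learning" : String) = x
  · rw [← h5]; rfl
  by_cases h6 : ("data_science" : String) = x
  · rw [← h6]; rfl
  by_cases h7 : ("statistics" : String) = x
  · rw [← h7]; rfl
  by_cases h8 : ("javascript" : String) = x
  · rw [← h8]; rfl
  by_cases h9 : ("react" : String) = x
  · rw [← h9]; rfl
  by_cases h10 : ("html" : String) = x
  · rw [← h10]; rfl
  by_cases h11 : ("css" : String) = x
  · rw [← h11]; rfl
  by_cases h12 : ("node.js" : String) = x
  · rw [← h12]; rfl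
  by_cases h13 : ("docker" : String) = x
  · rw [← h13]; rfl
  by_cases h14 : ("kubernetes" : String) = x
  · rw [← h14]; rfl
  by_cases h15 : ("ci_cd" : String) = x
  · rw [← h15]; rfl
  by_cases h16 : ("linux" : String) = x
  · rw [← h16]; rfl
  rw [pvIdx_eq]
  simp only [pvIdxList, PySem.Dict.get?_mk_cons, List.contains, beq_iff_eq, h1, h2, h3, h4, h5, h6, h7, h8, h9, h10, h11, h12, h13, h14, h15, h16]
  simp [PySem.Dict.get?, Ne.symm h4, Ne.symm h5, Ne.symm h6, Ne.symm h7]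
set_option maxRecDepth 10000 in
theorem pvCls3 (x : String) : (pvSkillToTrack.get? x == some "Web Development") = ((["javascript", "react", "html", "css", "node.js"].map (fun ts => PySem.Str.lower ts)).contains x : Bool) := by
  have hmap : (["javascript", "react", "html", "css", "node.js"].map (fun ts => PySem.Str.lower ts)) = (["javascript", "react", "html", "css", "node.js"] : List String) := by rfl
  rw [hmap]
  by_cases h1 : ("aws" : String) = x
  · rw [← h1]; rfl
  by_cases h2 : ("cloud_computing" : String) = x
  · rw [← h2]; rfl
  by_cases h3 : ("devops" : String) = x
  · rw [← h3]; rfl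
  by_cases h4 : ("python" : String) = x
  · rw [← h4]; rfl
  by_cases h5 : ("machine_learning" : String) = x
  · rw [← h5]; rfl
  by_cases h6 : ("data_science" : String) = x
  · rw [← h6]; rfl
  by_cases h7 : ("statistics" : String) = x
  · rw [← h7]; rfl
  by_cases h8 : ("javascript" : String) = x
  · rw [← h8]; rfl
  by_cases h9 : ("react" : String) = x
  · rw [← h9]; rfl
  by_cases h10 : ("html" : String) = x
  · rw [← h10]; rfl
  by_cases h11 : ("css" : String) = x
  · rw [← h11]; rfl
  by_cases h12 : ("node.js" : String) = x
  · rw [← h12]; rfl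
  by_cases h13 : ("docker" : String) = x
  · rw [← h13]; rfl
  by_cases h14 : ("kubernetes" : String) = x
  · rw [← h14]; rfl
  by_cases h15 : ("ci_cd" : String) = x
  · rw [← h15]; rfl
  by_cases h16 : ("linux" : String) = x
  · rw [← h16]; rfl
  rw [pvIdx_eq]
  simp only [pvIdxList, PySem.Dict.get?_mk_cons, List.contains, beq_iff_eq, h1, h2, h3, h4, h5, h6, h7, h8, h9, h10, h11, h12, h13, h14, h15, h16]
  simp [PySem.Dict.get?, Ne.symm h8, Ne.symm h9, Ne.symm h10, Ne.symm h11, Ne.symm h12]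
set_option maxRecDepth 10000 in
theorem pvCls4 (x : String) : (pvSkillToTrack.get? x == some "DevOps") = ((["docker", "kubernetes", "ci_cd", "linux"].map (fun ts => PySem.Str.lower ts)).contains x : Bool) := by
  have hmap : (["docker", "kubernetes", "ci_cd", "linux"].map (fun ts => PySem.Str.lower ts)) = (["docker", "kubernetes", "ci_cd", "linux"] : List String) := by rfl
  rw [hmap]
  by_cases h1 : ("aws" : String) = x
  · rw [← h1]; rfl
  by_cases h2 : ("cloud_computing" : String) = x
  · rw [← h2]; rfl
  by_cases h3 : ("devops" : String) = x
  · rw [← h3]; rfl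
  by_cases h4 : ("python" : String) = x
  · rw [← h4]; rfl
  by_cases h5 : ("machine_learning" : String) = x
  · rw [← h5]; rfl
  by_cases h6 : ("data_science" : String) = x
  · rw [← h6]; rfl
  by_cases h7 : ("statistics" : String) = x
  · rw [← h7]; rfl
  by_cases h8 : ("javascript" : String) = x
  · rw [← h8]; rfl
  by_cases h9 : ("react" : String) = x
  · rw [← h9]; rfl
  by_cases h10 : ("html" : String) = x
  · rw [← h10]; rfl
  by_cases h11 : ("css" : String) = x
  · rw [← h11]; rfl
  by_cases h12 : ("node.js" : String) = x
  · rw [← h12]; rfl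
  by_cases h13 : ("docker" : String) = x
  · rw [← h13]; rfl
  by_cases h14 : ("kubernetes" : String) = x
  · rw [← h14]; rfl
  by_cases h15 : ("ci_cd" : String) = x
  · rw [← h15]; rfl
  by_cases h16 : ("linux" : String) = x
  · rw [← h16]; rfl
  rw [pvIdx_eq]
  simp only [pvIdxList, PySem.Dict.get?_mk_cons, List.contains, beq_iff_eq, h1, h2, h3, h4, h5, h6, h7, h8, h9, h10, h11, h12, h13, h14, h15, h16]
  simp [PySem.Dict.get?, Ne.symm h13, Ne.symm h14, Ne.symm h15, Ne.symm h16]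


-- grouping loop: value at a track = the matching skills, in input order
theorem pvGroups_getD (skills : List String) (d : PySem.Dict String (List String)) (t : String) :
    (skills.foldl (fun d s =>
        match pvSkillToTrack.get? (PySem.Str.lower s) with
        | some track => d.modify track [] (fun l => l ++ [s])
        | none => d) d).getD t []
      = d.getD t [] ++ skills.filter (fun s => pvSkillToTrack.get? (PySem.Str.lower s) == some t) := by
  induction skills generalizing d with
  | nil => simp
  | cons s l ih =>
    simp only [List.foldl_cons, List.filter_cons]
    cases h : pvSkillToTrack.get? (PySem.Str.lower s) with
    | none => simp [ih]
    | some tr =>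
      by_cases ht : t = tr
      · subst ht; rw [ih]; simp
      · rw [ih]; simp [PySem.Dict.getD_modify, ht, Ne.symm ht]

-- grouping loop: a track key is present iff some skill matched it
theorem pvGroups_contains (skills : List String) (d : PySem.Dict String (List String)) (t : String) :
    (skills.foldl (fun d s =>
        match pvSkillToTrack.get? (PySem.Str.lower s) with
        | some track => d.modify track [] (fun l => l ++ [s])
        | none => d) d).contains t
      = (d.contains t || skills.any (fun s => pvSkillToTrack.get? (PySem.Str.lower s) == some t)) := by
  induction skills generalizing d with
  | nil => simp
  | cons s l ih =>
    simp only [List.foldl_cons, List.any_cons]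
    cases h : pvSkillToTrack.get? (PySem.Str.lower s) with
    | none => simp [ih]
    | some tr =>
      rw [ih]
      by_cases ht : t = tr
      · subst ht; simp [PySem.Dict.contains_modify]
      · have h1 : (t == tr) = false := beq_eq_false_iff_ne.mpr ht
        have h2 : (tr == t) = false := beq_eq_false_iff_ne.mpr (Ne.symm ht)
        simp [PySem.Dict.contains_modify, h1, h2]

theorem pvFilter_isEmpty (p : String → Bool) (xs : List String) : (xs.filter p).isEmpty = !xs.any p := by
  induction xs with
  | nil => rfl
  | cons a l ih => by_cases h : p a <;> simp [h, ih]

theorem pvMain (skills : List String) :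
    group_skills_for_certifications_py skills = group_skills_for_certifications_py_alt skills := by
  unfold group_skills_for_certifications_py group_skills_for_certifications_py_alt
  have e1 : (fun s => pvSkillToTrack.get? (PySem.Str.lower s) == some "AWS Cloud")
      = (fun s => ((["aws", "cloud_computing", "devops"].map (fun ts => PySem.Str.lower ts)).contains (PySem.Str.lower s) : Bool)) :=
    funext fun s => pvCls1 (PySem.Str.lower s)
  have e2 : (fun s => pvSkillToTrack.get? (PySem.Str.lower s) == some "Data Science")
      = (fun s => ((["python", "machine_learning", "data_science", "statistics"].map (fun ts => PySem.Str.lower ts)).contains (PySem.Str.lower s) : Bool)) :=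
    funext fun s => pvCls2 (PySem.Str.lower s)
  have e3 : (fun s => pvSkillToTrack.get? (PySem.Str.lower s) == some "Web Development")
      = (fun s => ((["javascript", "react", "html", "css", "node.js"].map (fun ts => PySem.Str.lower ts)).contains (PySem.Str.lower s) : Bool)) :=
    funext fun s => pvCls3 (PySem.Str.lower s)
  have e4 : (fun s => pvSkillToTrack.get? (PySem.Str.lower s) == some "DevOps")
      = (fun s => ((["docker", "kubernetes", "ci_cd", "linux"].map (fun ts => PySem.Str.lower ts)).contains (PySem.Str.lower s) : Bool)) :=
    funext fun s => pvCls4 (PySem.Str.lower s)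
  simp only [pvCertMappings, List.foldl_cons, List.foldl_nil, List.map_cons, List.map_nil,
    pvGroups_contains, pvGroups_getD, PySem.Dict.contains_empty, PySem.Dict.getD_empty,
    Bool.false_or, List.nil_append, e1, e2, e3, e4, pvFilter_isEmpty]
  by_cases b1 : skills.any fun s => ([PySem.Str.lower "aws", PySem.Str.lower "cloud_computing", PySem.Str.lower "devops"].contains (PySem.Str.lower s) : Bool) <;>
  by_cases b2 : skills.any fun s => ([PySem.Str.lower "python", PySem.Str.lower "machine_learning", PySem.Str.lower "data_science", PySem.Str.lower "statistics"].contains (PySem.Str.lower s) : Bool) <;>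
  by_cases b3 : skills.any fun s => ([PySem.Str.lower "javascript", PySem.Str.lower "react", PySem.Str.lower "html", PySem.Str.lower "css", PySem.Str.lower "node.js"].contains (PySem.Str.lower s) : Bool) <;>
  by_cases b4 : skills.any fun s => ([PySem.Str.lower "docker", PySem.Str.lower "kubernetes", PySem.Str.lower "ci_cd", PySem.Str.lower "linux"].contains (PySem.Str.lower s) : Bool) <;>
  simp only [b1, b2, b3, b4, Bool.not_true, Bool.not_false] <;> rfl

-- ===== VERDICT (by name: the statement is the Claim_ definition above) =====
theorem group_skills_for_certifications_py_spec : Claim_equal_group_skills_for_certifications_py := by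
  intro skills _
  unfold Spec_group_skills_for_certifications_py
  exact pvMain skills
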